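-- pv_equiv track=rewrite | github.com/ELTE-DSED/elte-rag-assistant | app/evaluation_v2.py | _evidence_match_count
-- ===== SOURCE A (Python) =====
-- def _evidence_match_count(
--     expected: set[tuple[str, int | None]],
--     observed: set[tuple[str, int | None]],
-- ) -> int:
--     if not expected or not observed:
--         return 0
--     matches = 0
--     for expected_source, expected_page in expected:
--         for observed_source, observed_page in observed:
--             if observed_source != expected_source:
--                 continue
--             if expected_page is None or observed_page is None or observed_page == expected_page:
--                 matches += 1
--                 break
--     return matches
-- ===== SOURCE B (Python) =====
-- def _evidence_match_count(
--     expected: set[tuple[str, int | None]],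
--     observed: set[tuple[str, int | None]],
-- ) -> int:
--     if not expected or not observed:
--         return 0
--     obs_pages = {}
--     for source, page in observed:
--         obs_pages.setdefault(source, set()).add(page)
--     exp_pages = {}
--     for source, page in expected:
--         exp_pages.setdefault(source, []).append(page)
--     total = 0
--     for source, pages in exp_pages.items():
--         ops = obs_pages.get(source)
--         if ops is None:
--             continue
--         wild = None in ops
--         total += sum(1 for p in pages if p is None or wild or p in ops)
--     return total
-- ===== Notes on version B (the rewrite author's own statement) =====
-- stated objective: faster
-- what changed: A runs a nested scan of observed for every expected pair; B builds one dict mapping each observed source to the set of its pages and one dict grouping expected pages by source, then counts matches in a single pass over the expected groups with set-membership tests.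
import Mathlib
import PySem

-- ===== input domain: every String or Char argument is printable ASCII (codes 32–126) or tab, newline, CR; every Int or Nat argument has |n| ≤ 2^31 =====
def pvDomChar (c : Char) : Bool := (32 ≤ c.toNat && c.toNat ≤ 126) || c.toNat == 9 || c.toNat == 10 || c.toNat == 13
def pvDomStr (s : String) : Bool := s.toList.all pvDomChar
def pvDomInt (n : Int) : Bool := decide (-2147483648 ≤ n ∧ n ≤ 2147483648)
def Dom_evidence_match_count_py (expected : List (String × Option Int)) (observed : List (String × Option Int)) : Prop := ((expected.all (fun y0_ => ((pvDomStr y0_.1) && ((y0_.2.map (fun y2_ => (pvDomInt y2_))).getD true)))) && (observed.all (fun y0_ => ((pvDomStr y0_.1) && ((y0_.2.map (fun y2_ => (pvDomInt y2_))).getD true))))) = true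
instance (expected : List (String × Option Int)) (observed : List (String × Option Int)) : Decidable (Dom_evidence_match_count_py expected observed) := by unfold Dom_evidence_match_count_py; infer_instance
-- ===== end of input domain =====

-- B replaces A's nested scan (for each expected pair, scan all of observed) by two dicts keyed by
-- source — observed pages per source as a set, expected pages grouped per source — and one pass over
-- the expected groups.

-- ===== PORT A =====
-- inner 'for observed_source, observed_page in observed: … break' loop of A
def emcInner (expected_source : String) (expected_page : Option Int) :
    List (String × Option Int) → Bool
  | [] => false
  | (observed_source, observed_page) :: rest =>
    if observed_source ≠ expected_source then emcInner expected_source expected_page rest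
    else if expected_page = none ∨ observed_page = none ∨ observed_page = expected_page then true
    else emcInner expected_source expected_page rest

def evidence_match_count_py (expected : List (String × Option Int)) (observed : List (String × Option Int)) : Int :=
  if expected = [] ∨ observed = [] then 0
  else
    expected.foldl
      (fun acc e => if emcInner e.1 e.2 observed then acc + 1 else acc) 0

-- ===== PORT B =====
-- obs_pages.setdefault(source, set()).add(page) loop
def emcObsPages (observed : List (String × Option Int)) : PySem.Dict String (PySem.Set (Option Int)) :=
  observed.foldl
    (fun d e => d.modify e.1 PySem.Set.empty (fun s => PySem.Set.add s e.2)) PySem.Dict.empty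

-- exp_pages.setdefault(source, []).append(page) loop
def emcExpPages (expected : List (String × Option Int)) : PySem.Dict String (List (Option Int)) :=
  expected.foldl (fun d e => d.modify e.1 [] (fun l => l ++ [e.2])) PySem.Dict.empty

-- wild = None in ops; sum(1 for p in pages if p is None or wild or p in ops)
def emcGroupCount (ops : PySem.Set (Option Int)) (pages : List (Option Int)) : Int :=
  let wild := ops.contains none
  ((pages.countP (fun p => p == none || wild || ops.contains p) : Nat) : Int)

def evidence_match_count_py_alt (expected : List (String × Option Int)) (observed : List (String × Option Int)) : Int :=
  if expected = [] ∨ observed = [] then 0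
  else
    let obs := emcObsPages observed
    (emcExpPages expected).items.foldl
      (fun total it =>
        match obs.get? it.1 with
        | none => total
        | some ops => total + emcGroupCount ops it.2) 0

-- countP splits over a disjunction of disjoint key tests

-- ===== PRECONDITION & SPEC =====
def Spec_evidence_match_count_py (expected : List (String × Option Int)) (observed : List (String × Option Int)) (out : Int) : Prop := out = evidence_match_count_py_alt expected observed
instance (expected : List (String × Option Int)) (observed : List (String × Option Int)) (out : Int) : Decidable (Spec_evidence_match_count_py expected observed out) := by unfold Spec_evidence_match_count_py; infer_instance

-- ===== CLAIM (what is proved, stated in full; the proofs are below) =====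
def Claim_equal_evidence_match_count_py : Prop := ∀ (expected : List (String × Option Int)) (observed : List (String × Option Int)), Dom_evidence_match_count_py expected observed → Spec_evidence_match_count_py expected observed (evidence_match_count_py expected observed)

-- ===== LEMMAS AND PROOFS =====

-- A's inner loop decides "some observed pair matches this expected pair"
theorem emcInner_iff (s : String) (p : Option Int) (l : List (String × Option Int)) :
    emcInner s p l = true ↔ ∃ o ∈ l, o.1 = s ∧ (p = none ∨ o.2 = none ∨ o.2 = p) := by
  induction l with
  | nil => simp [emcInner]
  | cons o rest ih =>
    obtain ⟨os, op⟩ := o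
    simp only [emcInner]
    split_ifs with h1 h2
    · simp only [ih, List.mem_cons]
      constructor
      · rintro ⟨o, ho, h⟩; exact ⟨o, Or.inr ho, h⟩
      · rintro ⟨o, (rfl | ho), h⟩
        · exact absurd h.1 h1
        · exact ⟨o, ho, h⟩
    · simp only [not_not] at h1
      constructor
      · intro _; exact ⟨(os, op), List.mem_cons_self, h1, h2⟩
      · intro _; rfl
    · simp only [not_not] at h1
      simp only [ih, List.mem_cons]
      constructor
      · rintro ⟨o, ho, h⟩; exact ⟨o, Or.inr ho, h⟩
      · rintro ⟨o, (rfl | ho), h⟩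
        · exact absurd h.2 h2
        · exact ⟨o, ho, h⟩

-- membership in the observed page-set dict, for any accumulator
theorem obs_fold_mem (observed : List (String × Option Int)) :
    ∀ (d : PySem.Dict String (PySem.Set (Option Int))) (s : String) (p : Option Int),
      (p ∈ (observed.foldl (fun d e => d.modify e.1 PySem.Set.empty (fun s => PySem.Set.add s e.2)) d).getD s PySem.Set.empty)
        ↔ p ∈ d.getD s PySem.Set.empty ∨ (s, p) ∈ observed := by
  induction observed with
  | nil => simp
  | cons o rest ih =>
    obtain ⟨os, op⟩ := o
    intro d s p
    simp only [List.foldl_cons, ih, List.mem_cons, Prod.mk.injEq]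
    rw [PySem.Dict.getD_modify]
    by_cases h : s = os
    · subst h
      rw [if_pos rfl, PySem.Set.mem_add]
      tauto
    · rw [if_neg h]
      tauto

theorem obs_mem (observed : List (String × Option Int)) (s : String) (p : Option Int) :
    p ∈ (emcObsPages observed).getD s PySem.Set.empty ↔ (s, p) ∈ observed := by
  rw [emcObsPages, obs_fold_mem]
  simp

theorem obs_keys (observed : List (String × Option Int)) :
    (emcObsPages observed).keys = PySem.Set.ofList (observed.map (·.1)) := by
  have h := PySem.Dict.keys_foldl_modify_key (l := observed) (key := fun e => e.1)
    (d0 := PySem.Set.empty) (f := fun _ e t => PySem.Set.add t e.2) (d := PySem.Dict.empty)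
  exact h.trans rfl

theorem obs_get?_none (observed : List (String × Option Int)) (s : String) :
    (emcObsPages observed).get? s = none ↔ s ∉ observed.map (·.1) := by
  rw [PySem.Dict.get?_eq_none_iff_not_mem_keys, obs_keys]
  simp [PySem.Set.mem_ofList]

-- the expected dict's items: distinct sources, each with its pages in order
theorem exp_items (expected : List (String × Option Int)) :
    (emcExpPages expected).items
      = (PySem.Set.ofList (expected.map (·.1))).map
          (fun s => (s, (expected.filter (fun e => e.1 == s)).map (·.2))) := by
  have hkeys : (emcExpPages expected).keys = PySem.Set.ofList (expected.map (·.1)) := by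
    have h := PySem.Dict.keys_foldl_modify_key (l := expected) (key := fun e => e.1)
      (d0 := ([] : List (Option Int))) (f := fun _ e l => l ++ [e.2]) (d := PySem.Dict.empty)
    exact h.trans rfl
  have hnd : (emcExpPages expected).keys.Nodup := by
    rw [hkeys]; exact PySem.Set.nodup_ofList _
  rw [PySem.Dict.items_eq_map_keys _ hnd [], hkeys]
  apply List.map_congr_left
  intro s _
  rw [emcExpPages, PySem.Dict.getD_foldl_modify_append]
  simp

-- countP splits over a disjunction of disjoint key tests
theorem countP_key_split (l : List (String × Option Int)) (q : (String × Option Int) → Bool)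
    (s : String) (S : List String) (hs : s ∉ S) :
    l.countP (fun e => q e && decide (e.1 ∈ s :: S))
      = l.countP (fun e => q e && (e.1 == s)) + l.countP (fun e => q e && decide (e.1 ∈ S)) := by
  induction l with
  | nil => simp
  | cons e rest ih =>
    simp only [List.countP_cons, ih]
    by_cases h1 : e.1 = s
    · simp [h1, hs, List.mem_cons]
      omega
    · by_cases h2 : e.1 ∈ S
      · simp [h1, h2, List.mem_cons]
        omega
      · simp [h1, h2, List.mem_cons]

-- summing per-source counts over distinct sources
theorem sum_countP_groups (l : List (String × Option Int)) (q : (String × Option Int) → Bool) :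
    ∀ (S : List String), S.Nodup →
      ((S.map (fun s => (((l.filter (fun e => e.1 == s)).countP q : Nat) : Int))).sum)
        = ((l.countP (fun e => q e && decide (e.1 ∈ S)) : Nat) : Int) := by
  intro S
  induction S with
  | nil => simp
  | cons s S ih =>
    intro hnd
    rw [List.nodup_cons] at hnd
    simp only [List.map_cons, List.sum_cons, ih hnd.2]
    rw [countP_key_split l q s S hnd.1, List.countP_filter]
    push_cast
    ring

-- one group's contribution in B equals A's per-element count over that source's pairs
theorem group_value (observed l : List (String × Option Int)) (s : String) :
    (match (emcObsPages observed).get? s with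
     | none => (0 : Int)
     | some ops => emcGroupCount ops ((l.filter (fun e => e.1 == s)).map (·.2)))
    = (((l.filter (fun e => e.1 == s)).countP (fun e => emcInner e.1 e.2 observed) : Nat) : Int) := by
  cases hget : (emcObsPages observed).get? s with
  | none =>
    have hno : s ∉ observed.map (·.1) := (obs_get?_none observed s).mp hget
    have : (l.filter (fun e => e.1 == s)).countP (fun e => emcInner e.1 e.2 observed) = 0 := by
      rw [List.countP_eq_zero]
      intro e he
      have hs : e.1 = s := by simpa using List.of_mem_filter he
      intro htrue
      obtain ⟨o, ho, h1, -⟩ := (emcInner_iff e.1 e.2 observed).mp htrue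
      exact hno (List.mem_map.mpr ⟨o, ho, h1.trans hs⟩)
    simp [this]
  | some ops =>
    have hops : (emcObsPages observed).getD s PySem.Set.empty = ops := by
      rw [PySem.Dict.getD_eq_get?_getD, hget]; rfl
    have hmem : ∀ p, p ∈ ops ↔ (s, p) ∈ observed := by
      intro p; rw [← hops, obs_mem]
    have hsrc : ∃ o ∈ observed, o.1 = s := by
      have : s ∈ (emcObsPages observed).keys := by
        by_contra hc
        rw [← PySem.Dict.get?_eq_none_iff_not_mem_keys] at hc
        rw [hget] at hc; cases hc
      rw [obs_keys, PySem.Set.mem_ofList] at this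
      obtain ⟨o, ho, h1⟩ := List.mem_map.mp this
      exact ⟨o, ho, h1⟩
    show emcGroupCount ops ((l.filter (fun e => e.1 == s)).map (·.2)) = _
    rw [emcGroupCount]
    simp only [List.countP_map]
    congr 1
    apply List.countP_congr
    intro e he
    have hs : e.1 = s := by simpa using List.of_mem_filter he
    simp only [Function.comp]
    rw [emcInner_iff, hs]
    simp only [Bool.or_eq_true, beq_iff_eq, PySem.Set.contains, List.contains_eq_mem, decide_eq_true_eq, hmem]
    constructor
    · rintro ((h | h) | h)
      · obtain ⟨o, ho, h1⟩ := hsrc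
        exact ⟨o, ho, h1, Or.inl h⟩
      · exact ⟨(s, none), h, rfl, Or.inr (Or.inl rfl)⟩
      · exact ⟨(s, e.2), h, rfl, Or.inr (Or.inr rfl)⟩
    · rintro ⟨o, ho, h1, (h | h | h)⟩
      · exact Or.inl (Or.inl h)
      · exact Or.inl (Or.inr (by rw [← h1, ← h]; simpa using ho))
      · exact Or.inr (by rw [← h1, ← h]; simpa using ho)

theorem main_thm (expected observed : List (String × Option Int)) :
    evidence_match_count_py expected observed = evidence_match_count_py_alt expected observed := by
  rw [evidence_match_count_py, evidence_match_count_py_alt]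
  by_cases hg : expected = [] ∨ observed = []
  · rw [if_pos hg, if_pos hg]
  · rw [if_neg hg, if_neg hg]
    rw [PySem.List.foldl_count_if]
    rw [List.foldl_ext _
      (fun total it => total + (match (emcObsPages observed).get? it.1 with
        | none => (0 : Int)
        | some ops => emcGroupCount ops it.2)) 0
      (by intro a b _; cases h : (emcObsPages observed).get? b.1 <;> simp [h])]
    rw [PySem.List.foldl_add]
    rw [exp_items, List.map_map]
    have hmap : ((PySem.Set.ofList (expected.map (·.1))).map
        ((fun it => (match (emcObsPages observed).get? it.1 with
          | none => (0 : Int)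
          | some ops => emcGroupCount ops it.2)) ∘
          (fun s => (s, (expected.filter (fun e => e.1 == s)).map (·.2)))))
        = (PySem.Set.ofList (expected.map (·.1))).map
            (fun s => (((expected.filter (fun e => e.1 == s)).countP
              (fun e => emcInner e.1 e.2 observed) : Nat) : Int)) := by
      apply List.map_congr_left
      intro s _
      exact group_value observed expected s
    rw [hmap, sum_countP_groups expected _ _ (PySem.Set.nodup_ofList _)]
    have : expected.countP (fun e => emcInner e.1 e.2 observed && decide (e.1 ∈ PySem.Set.ofList (expected.map (·.1))))
        = expected.countP (fun e => emcInner e.1 e.2 observed) := by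
      apply List.countP_congr
      intro e he
      have : e.1 ∈ PySem.Set.ofList (expected.map (·.1)) := by
        rw [PySem.Set.mem_ofList]; exact List.mem_map.mpr ⟨e, he, rfl⟩
      simp [this]
    rw [this]

-- ===== VERDICT (by name: the statement is the Claim_ definition above) =====
theorem evidence_match_count_py_spec : Claim_equal_evidence_match_count_py := by
  intro expected observed _
  unfold Spec_evidence_match_count_py
  exact main_thm expected observed
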